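-- pv_equiv track=rewrite | github.com/pollyndos/uni_repository | tokenizer.py | stringdiv
-- ===== SOURCE A (Python) =====
-- def stringdiv(string):
--     """ Divides a string in a list of alphabetical substrings.
--
--     @param string: a string
--     @return a list of alphabetical substrings
--     """
--     listwords = []
--     if len(string) == 0:
--         listwords = []
--     else:
--         for index, char in enumerate(string):
--             # find the beginning of an alpha substring
--             # it is either the first char in string
--             # or the char that is alpha, but the previous one is not
--             if char.isalpha() and (index == 0 or not string[index-1].isalpha()):
--                 i = index
--
--             # making sure that we didn't reach the last char of the string
--             if (index + 1) <= (len(string) - 1) and char.isalpha() and not string[index + 1].isalpha():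
--                 # find the end of alpha substring and add it to list
--                 if char.isalpha() and not string[index+1].isalpha():
--                     listwords.append(string[i:index+1])
--
--         # check the last char in the string
--         # add to the list if it is alpha
--         if char.isalpha():
--             listwords.append(string[i:])
--
--     return listwords
-- ===== SOURCE B (Python) =====
-- def stringdiv(string):
--     """ Divides a string in a list of alphabetical substrings. """
--     words = []
--     cur = ""
--     for ch in string:
--         if ch.isalpha():
--             cur += ch
--         elif cur:
--             words.append(cur)
--             cur = ""
--     if cur:
--         words.append(cur)
--     return words
-- ===== Notes on version B (the rewrite author's own statement) =====
-- stated objective: simpler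
-- what changed: Replaced A's index-based lookbehind/lookahead run-boundary detection with absolute slicing of the original string by a single accumulator pass that builds each alphabetical run character by character and flushes it at each non-letter (or at the end).
import Mathlib
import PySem

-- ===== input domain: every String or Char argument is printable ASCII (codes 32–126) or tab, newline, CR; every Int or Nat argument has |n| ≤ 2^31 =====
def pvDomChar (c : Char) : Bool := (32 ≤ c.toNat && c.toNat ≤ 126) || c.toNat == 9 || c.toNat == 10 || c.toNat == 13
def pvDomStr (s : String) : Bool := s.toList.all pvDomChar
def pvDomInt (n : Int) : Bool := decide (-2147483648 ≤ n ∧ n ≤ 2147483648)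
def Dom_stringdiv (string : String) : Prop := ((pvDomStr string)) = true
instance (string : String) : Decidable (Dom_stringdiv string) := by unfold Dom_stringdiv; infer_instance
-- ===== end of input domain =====

-- B replaces A's index bookkeeping (lookbehind/lookahead boundary tests + slicing of the
-- original string) by one accumulator pass that grows the current run and flushes it; simpler.

-- ===== PORT A =====
-- the body of A's 'for index, char in enumerate(string)' loop; state = (listwords, i).
-- Python's 'i' starts unbound but is provably assigned before any use; modelled with initial 0.
def stringdivStep (s : List Char) (st : List String × Int) (p : Int × Char) : List String × Int :=
  let i : Int :=
    if PySem.Chars.isalpha p.2 &&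
        (p.1 == 0 || !PySem.Chars.isalpha (PySem.List.pyGetD s (p.1 - 1) ' ')) then p.1 else st.2
  let lw : List String :=
    if decide (p.1 + 1 ≤ (s.length : Int) - 1) && PySem.Chars.isalpha p.2 &&
        !PySem.Chars.isalpha (PySem.List.pyGetD s (p.1 + 1) ' ') then
      (if PySem.Chars.isalpha p.2 && !PySem.Chars.isalpha (PySem.List.pyGetD s (p.1 + 1) ' ') then
        st.1 ++ [String.ofList (PySem.List.slice s (some i) (some (p.1 + 1)))]
      else st.1)
    else st.1
  (lw, i)

def stringdiv (string : String) : List String :=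
  let s := string.toList
  if s.length = 0 then []
  else
    let r := (PySem.List.enumerate s 0).foldl (stringdivStep s) ([], 0)
    -- after the loop, 'char' holds the last character of the string
    if PySem.Chars.isalpha (PySem.List.pyGetD s ((s.length : Int) - 1) ' ') then
      r.1 ++ [String.ofList (PySem.List.slice s (some r.2) none)]
    else r.1

-- ===== PORT B =====
def stringdivAltStep (st : List String × List Char) (c : Char) : List String × List Char :=
  if PySem.Chars.isalpha c then (st.1, st.2 ++ [c])
  else if st.2 ≠ [] then (st.1 ++ [String.ofList st.2], []) else st

def stringdiv_alt (string : String) : List String :=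
  let r := string.toList.foldl stringdivAltStep ([], [])
  if r.2 ≠ [] then r.1 ++ [String.ofList r.2] else r.1

-- ===== PRECONDITION & SPEC =====
def Spec_stringdiv (string : String) (out : List String) : Prop := out = stringdiv_alt string
instance (string : String) (out : List String) : Decidable (Spec_stringdiv string out) := by unfold Spec_stringdiv; infer_instance

-- ===== CLAIM (what is proved, stated in full; the proofs are below) =====
def Claim_equal_stringdiv : Prop := ∀ (string : String), Dom_stringdiv string → Spec_stringdiv string (stringdiv string)

-- ===== LEMMAS AND PROOFS =====

-- A's loop state after the first k characters
def fA (s : List Char) (k : Nat) : List String × Int :=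
  (PySem.List.enumerate (s.take k) 0).foldl (stringdivStep s) ([], 0)

-- B's loop state after the first k characters
def fB (s : List Char) (k : Nat) : List String × List Char :=
  (s.take k).foldl stringdivAltStep ([], [])

-- the coupling invariant between the two loop states
def pvInv (s : List Char) (k : Nat) : Prop :=
  ((fA s k).1 = (fB s k).1 ++
      (if (fB s k).2 ≠ [] ∧ k < s.length ∧ PySem.Chars.isalpha (s.getD k ' ') = false
       then [String.ofList (fB s k).2] else []))
  ∧ ((fB s k).2 ≠ [] ↔ 0 < k ∧ PySem.Chars.isalpha (s.getD (k - 1) ' ') = true)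
  ∧ ((fB s k).2 ≠ [] →
      (fA s k).2 = ((k - (fB s k).2.length : Nat) : Int)
      ∧ (fB s k).2.length ≤ k
      ∧ (s.drop (k - (fB s k).2.length)).take (fB s k).2.length = (fB s k).2)

lemma fA_succ (s : List Char) (k : Nat) (h : k < s.length) :
    fA s (k + 1) = stringdivStep s (fA s k) ((k : Int), s[k]) := by
  have ht : s.take (k + 1) = s.take k ++ [s[k]] := by
    rw [List.take_add_one, List.getElem?_eq_getElem h]; rfl
  unfold fA
  rw [ht, PySem.List.enumerate_append, List.foldl_append]
  simp [PySem.List.enumerate_cons, Nat.min_eq_left (le_of_lt h)]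

lemma fB_succ (s : List Char) (k : Nat) (h : k < s.length) :
    fB s (k + 1) = stringdivAltStep (fB s k) s[k] := by
  have ht : s.take (k + 1) = s.take k ++ [s[k]] := by
    rw [List.take_add_one, List.getElem?_eq_getElem h]; rfl
  unfold fB
  rw [ht, List.foldl_append]
  rfl

lemma pvInv_zero (s : List Char) : pvInv s 0 := by
  simp [pvInv, fA, fB]

lemma pvInv_succ (s : List Char) (k : Nat) (h : k < s.length) (ih : pvInv s k) :
    pvInv s (k + 1) := by
  obtain ⟨h1, h2, h3⟩ := ih
  have hc : s.getD k ' ' = s[k] := List.getD_eq_getElem s ' ' h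
  unfold pvInv
  rw [fA_succ s k h, fB_succ s k h]
  by_cases ha : PySem.Chars.isalpha s[k] = true
  · -- the current character is alphabetic: the run grows
    have hB' : stringdivAltStep (fB s k) s[k] = ((fB s k).1, (fB s k).2 ++ [s[k]]) := by
      simp [stringdivAltStep, ha]
    have hpend : ¬((fB s k).2 ≠ [] ∧ k < s.length ∧ PySem.Chars.isalpha (s.getD k ' ') = false) := by
      rw [hc]; rintro ⟨-, -, hf⟩; rw [ha] at hf; cases hf
    rw [if_neg hpend, List.append_nil] at h1
    -- the start-of-run condition in A holds iff B's current run is empty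
    have hcond : (PySem.Chars.isalpha s[k] &&
        (((k : Nat) : Int) == 0 || !PySem.Chars.isalpha (PySem.List.pyGetD s (((k : Nat) : Int) - 1) ' ')))
        = true ↔ (fB s k).2 = [] := by
      rcases Nat.eq_zero_or_pos k with hk0 | hk0
      · subst hk0
        simp only [Nat.cast_zero, ha]
        constructor
        · intro _
          by_contra hne
          have := (h2.mp hne).1
          omega
        · intro _; simp
      · have hcast : ((k : Nat) : Int) - 1 = (((k - 1 : Nat) : Nat) : Int) := by omega
        have hne0 : (((k : Nat) : Int) == 0) = false := by simp; omega
        rw [hcast, hne0, PySem.List.pyGetD_natCast, ha]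
        constructor
        · intro hb
          by_contra hne
          have ht := (h2.mp hne).2
          rw [ht] at hb
          simp at hb
        · intro hb
          have hprev : PySem.Chars.isalpha (s.getD (k - 1) ' ') = false := by
            rcases Bool.eq_false_or_eq_true (PySem.Chars.isalpha (s.getD (k - 1) ' ')) with ht | hf
            · exact absurd (h2.mpr ⟨hk0, ht⟩) (by simpa using hb)
            · exact hf
          rw [hprev]
          simp
    have hiv : (if PySem.Chars.isalpha s[k] &&
          (((k : Nat) : Int) == 0 || !PySem.Chars.isalpha (PySem.List.pyGetD s (((k : Nat) : Int) - 1) ' '))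
        then ((k : Nat) : Int) else (fA s k).2) =
        ((k + 1 - ((fB s k).2 ++ [s[k]]).length : Nat) : Int) := by
      by_cases hcur : (fB s k).2 = []
      · rw [if_pos (hcond.mpr hcur), hcur]
        simp
      · rw [if_neg (by rw [hcond]; exact hcur)]
        obtain ⟨hi, hm, -⟩ := h3 hcur
        rw [hi]
        congr 1
        simp only [List.length_append, List.length_cons, List.length_nil]
        omega
    have hmle : ((fB s k).2 ++ [s[k]]).length ≤ k + 1 := by
      by_cases hcur : (fB s k).2 = []
      · rw [hcur]; simp
      · obtain ⟨-, hm, -⟩ := h3 hcur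
        simp only [List.length_append, List.length_cons, List.length_nil]
        omega
    have hslice : (s.drop (k + 1 - ((fB s k).2 ++ [s[k]]).length)).take ((fB s k).2 ++ [s[k]]).length
        = (fB s k).2 ++ [s[k]] := by
      by_cases hcur : (fB s k).2 = []
      · rw [hcur]
        simp only [List.nil_append, List.length_cons, List.length_nil, Nat.add_sub_cancel]
        rw [List.drop_eq_getElem_cons h]
        rfl
      · obtain ⟨-, hm, htk⟩ := h3 hcur
        have hlen : ((fB s k).2 ++ [s[k]]).length = (fB s k).2.length + 1 := by simp
        rw [hlen]
        have he1 : k + 1 - ((fB s k).2.length + 1) = k - (fB s k).2.length := by omega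
        rw [he1, List.take_add_one, htk, List.getElem?_drop]
        have he2 : k - (fB s k).2.length + (fB s k).2.length = k := by omega
        rw [he2, List.getElem?_eq_getElem h]
        rfl
    refine ⟨?_, ?_, ?_⟩
    · -- listwords
      rw [hB']
      simp only [stringdivStep, hiv]
      have hcast1 : ((k : Nat) : Int) + 1 = (((k + 1 : Nat) : Nat) : Int) := by push_cast; ring
      rw [hcast1, PySem.List.pyGetD_natCast, ha]
      rcases Bool.eq_false_or_eq_true (PySem.Chars.isalpha (s.getD (k + 1) ' ')) with ht | hf
      · -- next char (if any) is alphabetic: neither side appends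
        rw [ht]
        simp only [Bool.not_true, Bool.and_false, Bool.false_eq_true, if_false]
        rw [h1, if_neg (by rintro ⟨-, -, hx⟩; cases hx), List.append_nil]
      · rw [hf]
        by_cases hP1 : k + 1 < s.length
        · -- run is closed by the next char: both sides append the run
          have hd : (decide ((((k + 1 : Nat) : Nat) : Int) ≤ (s.length : Int) - 1)) = true := by
            simp; omega
          rw [hd]
          simp only [Bool.not_false, Bool.and_self, if_true]
          rw [h1, if_pos (by exact ⟨by simp, hP1, by trivial⟩), PySem.List.slice_natCast]
          have hba : k + 1 - (k + 1 - ((fB s k).2 ++ [s[k]]).length)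
              = ((fB s k).2 ++ [s[k]]).length := by omega
          rw [hba, hslice]
        · -- the string ends here: the trailing run stays pending
          have hd : (decide ((((k + 1 : Nat) : Nat) : Int) ≤ (s.length : Int) - 1)) = false := by
            simp; omega
          rw [hd]
          simp only [Bool.false_and, Bool.false_eq_true, if_false]
          rw [h1, if_neg (by rintro ⟨-, hx, -⟩; exact hP1 hx), List.append_nil]
    · -- the run-nonempty characterisation
      rw [hB']
      simp only [Nat.add_sub_cancel]
      constructor
      · intro _
        exact ⟨by omega, by rw [hc]; exact ha⟩
      · intro _
        simp
    · -- start index and slice facts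
      intro _
      rw [hB']
      simp only [stringdivStep]
      exact ⟨hiv, hmle, hslice⟩
  · -- non-alphabetic character: A appends nothing, B flushes the run
    have haf : PySem.Chars.isalpha s[k] = false := by
      rcases Bool.eq_false_or_eq_true (PySem.Chars.isalpha s[k]) with ht | hf
      · exact absurd ht ha
      · exact hf
    have hA' : stringdivStep s (fA s k) (((k : Nat) : Int), s[k]) = ((fA s k).1, (fA s k).2) := by
      simp [stringdivStep, haf]
    have hB' : stringdivAltStep (fB s k) s[k] =
        (if (fB s k).2 ≠ [] then ((fB s k).1 ++ [String.ofList (fB s k).2], []) else (fB s k)) := by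
      simp [stringdivAltStep, haf]
    rw [hA', hB']
    by_cases hcur : (fB s k).2 = []
    · rw [if_neg (by simpa using hcur)]
      rw [if_neg (fun hx => hx.1 hcur), List.append_nil] at h1
      refine ⟨?_, ?_, ?_⟩
      · rw [h1, if_neg (by rintro ⟨hne, -, -⟩; exact hne hcur), List.append_nil]
      · rw [hcur]
        constructor
        · intro hx; exact absurd rfl hx
        · rintro ⟨-, hx⟩
          rw [Nat.add_sub_cancel, hc, haf] at hx
          cases hx
      · intro hx; exact absurd hcur hx
    · rw [if_pos hcur]
      rw [if_pos ⟨hcur, h, by rw [hc]; exact haf⟩] at h1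
      refine ⟨?_, ?_, ?_⟩
      · rw [h1]
        rw [if_neg (by rintro ⟨hne, -, -⟩; exact hne rfl), List.append_nil]
      · constructor
        · intro hx; exact absurd rfl hx
        · rintro ⟨-, hx⟩; rw [Nat.add_sub_cancel, hc, haf] at hx; cases hx
      · intro hx; exact absurd rfl hx

lemma pvInv_all (s : List Char) (k : Nat) (hk : k ≤ s.length) : pvInv s k := by
  induction k with
  | zero => exact pvInv_zero s
  | succ n ih => exact pvInv_succ s n (by omega) (ih (by omega))

-- ===== VERDICT (by name: the statement is the Claim_ definition above) =====
theorem stringdiv_spec : Claim_equal_stringdiv := by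
  unfold Claim_equal_stringdiv
  intro string _
  unfold Spec_stringdiv stringdiv stringdiv_alt
  set s := string.toList with hs
  by_cases hnil : s.length = 0
  · have : s = [] := List.eq_nil_of_length_eq_zero hnil
    rw [this]
    simp
  · simp only [hnil, if_false]
    have hlen : 0 < s.length := Nat.pos_of_ne_zero hnil
    have hA : (PySem.List.enumerate s).foldl (stringdivStep s) ([], 0) = fA s s.length := by
      unfold fA; rw [List.take_length]
    have hB : s.foldl stringdivAltStep ([], []) = fB s s.length := by
      unfold fB; rw [List.take_length]
    obtain ⟨h1, h2, h3⟩ := pvInv_all s s.length le_rfl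
    rw [if_neg (by rintro ⟨-, hx, -⟩; omega), List.append_nil] at h1
    have hcast : ((s.length : Nat) : Int) - 1 = (((s.length - 1 : Nat) : Nat) : Int) := by
      omega
    rw [hA, hB, hcast, PySem.List.pyGetD_natCast]
    by_cases hlast : PySem.Chars.isalpha (s.getD (s.length - 1) ' ') = true
    · rw [if_pos hlast]
      have hcur : (fB s s.length).2 ≠ [] := h2.mpr ⟨hlen, hlast⟩
      obtain ⟨hi, hm, htk⟩ := h3 hcur
      have hdrop : s.drop (s.length - (fB s s.length).2.length) = (fB s s.length).2 := by
        have hlth : (s.drop (s.length - (fB s s.length).2.length)).length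
            ≤ (fB s s.length).2.length := by
          rw [List.length_drop, Nat.sub_sub_self hm]
        exact (List.take_of_length_le hlth).symm.trans htk
      rw [hi, PySem.List.slice_from_natCast, hdrop, h1, if_pos (by simpa using hcur)]
    · rw [if_neg hlast]
      have hcur : (fB s s.length).2 = [] := by
        by_contra hne
        exact hlast (h2.mp hne).2
      rw [h1, if_neg (by simpa using hcur)]
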